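-- pv_equiv track=rewrite | github.com/PythonCoderAS/Algorithims-Assignments | Dynamic Programming Optimization 1/split_link.py | split_link
-- ===== SOURCE A (Python) =====
-- def split_link(prices):
--     """Splits the chain on a link. Variable prices is an array of possible prices."""
--     data = [0] * (len(prices) + 4)
--     current_index = len(prices) - 3
--     while current_index >= 0:
--         option_1 = sum(prices[current_index:current_index+3]) + data[current_index + 4]
--         option_2 = sum(prices[current_index:current_index+2]) + data[current_index + 3]
--         data[current_index] = max(option_1, option_2)
--         current_index -= 1
--     return max(data[0:3])
-- ===== SOURCE B (Python) =====
-- def split_link(prices):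
--     """Splits the chain on a link. Variable prices is an array of possible prices."""
--     n = len(prices)
--     memo = {}
--
--     def f(i):
--         """Best total obtainable from link index i onward (0 once fewer than 3 links
--         remain), memoized; an explicit work stack replaces recursion (plain recursion
--         would blow the recursion limit on long chains)."""
--         stack = [i]
--         while stack:
--             j = stack[-1]
--             if j >= n - 2:
--                 memo[j] = 0
--                 stack.pop()
--             elif j in memo:
--                 stack.pop()
--             elif j + 3 in memo and j + 4 in memo:
--                 memo[j] = max(sum(prices[j:j + 3]) + memo[j + 4],
--                               sum(prices[j:j + 2]) + memo[j + 3])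
--                 stack.pop()
--             else:
--                 stack.append(j + 4)
--                 stack.append(j + 3)
--         return memo[i]
--
--     return max(f(0), f(1), f(2))
-- ===== Notes on version B (the rewrite author's own statement) =====
-- stated objective: alternative
-- what changed: Replaced A's bottom-up while-loop filling a zero-padded scratch array with a top-down, demand-driven solver: values f(i) are memoized in a dict and computed with an explicit work stack, returning max(f(0), f(1), f(2)).
import Mathlib
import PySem

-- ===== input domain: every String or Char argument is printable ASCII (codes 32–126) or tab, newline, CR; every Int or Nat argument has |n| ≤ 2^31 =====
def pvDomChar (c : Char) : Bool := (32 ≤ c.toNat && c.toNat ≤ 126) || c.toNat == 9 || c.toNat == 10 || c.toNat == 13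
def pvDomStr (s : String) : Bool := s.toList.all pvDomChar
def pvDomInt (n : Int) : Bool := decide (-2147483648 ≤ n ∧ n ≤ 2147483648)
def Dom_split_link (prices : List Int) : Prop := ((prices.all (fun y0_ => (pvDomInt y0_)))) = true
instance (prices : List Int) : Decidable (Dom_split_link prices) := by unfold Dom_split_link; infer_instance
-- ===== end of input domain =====

-- B replaces A's bottom-up while-loop over a zero-padded scratch array by a top-down,
-- demand-driven solver: f(i) memoized in a dict, driven by an explicit work stack
-- (objective: alternative decomposition, same cost).

-- ===== PORT A =====
-- the while loop, one fuel tick per iteration; fuel = prices.length suffices (the loop runs max(len-2,0) times)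
def splitLinkLoop (prices : List Int) (data : List Int) (ci : Int) : Nat → List Int
  | 0 => data
  | fuel + 1 =>
    if ci ≥ 0 then
      -- option_1 / option_2 inlined into the max
      splitLinkLoop prices
        (PySem.List.pySetD data ci
          (max ((PySem.List.slice prices (some ci) (some (ci + 3))).sum + PySem.List.pyGetD data (ci + 4) 0)
               ((PySem.List.slice prices (some ci) (some (ci + 2))).sum + PySem.List.pyGetD data (ci + 3) 0)))
        (ci - 1) fuel
    else data

def split_link (prices : List Int) : Int :=
  let data := List.replicate (prices.length + 4) (0 : Int)
  let data := splitLinkLoop prices data ((prices.length : Int) - 3) prices.length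
  -- max(data[0:3]): the slice always has 3 elements (len data ≥ 4), so Python's max never raises
  (PySem.List.max? (PySem.List.slice data (some 0) (some 3)) (fun x => x)).getD 0

-- ===== PORT B =====
-- Source B's while loop over the work stack, one fuel tick per iteration; the Python list's
-- end (stack[-1]/append/pop) is the Lean list's HEAD, so the port's list holds the stack
-- top-first.  fuel = 4^prices.length bounds the iteration count (proved in the lemmas).
def splitLinkLoopB (prices : List Int) (n : Int) : Nat → PySem.Dict Int Int → List Int → PySem.Dict Int Int
  | 0, memo, _ => memo
  | _ + 1, memo, [] => memo
  | fuel + 1, memo, j :: rest =>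
    if j ≥ n - 2 then
      splitLinkLoopB prices n fuel (memo.insert j 0) rest
    else if memo.contains j then
      splitLinkLoopB prices n fuel memo rest
    else if memo.contains (j + 3) && memo.contains (j + 4) then
      -- memo[j+4] / memo[j+3] are present here (guard above), so getD never takes its default
      splitLinkLoopB prices n fuel
        (memo.insert j
          (max ((PySem.List.slice prices (some j) (some (j + 3))).sum + memo.getD (j + 4) 0)
               ((PySem.List.slice prices (some j) (some (j + 2))).sum + memo.getD (j + 3) 0)))
        rest
    else
      splitLinkLoopB prices n fuel memo ((j + 3) :: (j + 4) :: j :: rest)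

-- f(i): run the stack loop from [i], then read memo[i] (present on exit, so getD is exact)
def splitLinkFAux (prices : List Int) (n : Int) (memo : PySem.Dict Int Int) (i : Int) :
    PySem.Dict Int Int × Int :=
  let memo' := splitLinkLoopB prices n (4 ^ prices.length) memo [i]
  (memo', memo'.getD i 0)

def split_link_alt (prices : List Int) : Int :=
  let n : Int := prices.length
  -- max(f(0), f(1), f(2)): each call sees the memo left by the previous one
  let r0 := splitLinkFAux prices n PySem.Dict.empty 0
  let r1 := splitLinkFAux prices n r0.1 1
  let r2 := splitLinkFAux prices n r1.1 2
  max (max r0.2 r1.2) r2.2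

-- ===== PRECONDITION & SPEC =====
def Spec_split_link (prices : List Int) (out : Int) : Prop := out = split_link_alt prices
instance (prices : List Int) (out : Int) : Decidable (Spec_split_link prices out) := by unfold Spec_split_link; infer_instance

-- ===== CLAIM (what is proved, stated in full; the proofs are below) =====
def Claim_equal_split_link : Prop := ∀ (prices : List Int), Dom_split_link prices → Spec_split_link prices (split_link prices)

-- ===== LEMMAS AND PROOFS =====

-- proof-side bridge: the suffix DP value both programs compute
def splitLinkF (prices : List Int) (i : Nat) : Int :=
  if prices.length < i + 3 then 0
  else
    max (prices.getD i 0 + prices.getD (i + 1) 0 + prices.getD (i + 2) 0 + splitLinkF prices (i + 4))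
        (prices.getD i 0 + prices.getD (i + 1) 0 + splitLinkF prices (i + 3))
termination_by prices.length - i

theorem splitLinkF_zero (prices : List Int) (i : Nat) (h : prices.length < i + 3) :
    splitLinkF prices i = 0 := by rw [splitLinkF, if_pos h]

theorem take3_eq_getD (xs : List Int) (h : 3 ≤ xs.length) :
    xs.take 3 = [xs.getD 0 0, xs.getD 1 0, xs.getD 2 0] := by
  match xs, h with
  | a :: b :: c :: rest, _ => simp [List.take, List.getD]

theorem sum_take_three (xs : List Int) (i : Nat) (h : i + 3 ≤ xs.length) :
    ((xs.drop i).take 3).sum = xs.getD i 0 + xs.getD (i + 1) 0 + xs.getD (i + 2) 0 := by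
  rw [List.drop_eq_getElem_cons (by omega), List.drop_eq_getElem_cons (l := xs) (i := i + 1) (by omega),
      List.drop_eq_getElem_cons (l := xs) (i := i + 2) (by omega)]
  simp only [List.take_succ_cons, List.take_zero, List.sum_cons, List.sum_nil, List.getD,
        List.getElem?_eq_getElem (by omega : i < xs.length),
        List.getElem?_eq_getElem (by omega : i + 1 < xs.length),
        List.getElem?_eq_getElem (by omega : i + 2 < xs.length), Option.getD_some]
  omega

theorem sum_take_two (xs : List Int) (i : Nat) (h : i + 2 ≤ xs.length) :
    ((xs.drop i).take 2).sum = xs.getD i 0 + xs.getD (i + 1) 0 := by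
  rw [List.drop_eq_getElem_cons (by omega), List.drop_eq_getElem_cons (l := xs) (i := i + 1) (by omega)]
  simp only [List.take_succ_cons, List.take_zero, List.sum_cons, List.sum_nil, List.getD,
        List.getElem?_eq_getElem (by omega : i < xs.length),
        List.getElem?_eq_getElem (by omega : i + 1 < xs.length), Option.getD_some]
  omega

theorem splitLinkLoop_invariant (prices : List Int) :
    ∀ (fuel : Nat) (ci : Int) (data : List Int),
      data.length = prices.length + 4 →
      ci ≤ (prices.length : Int) - 3 →
      (ci + 1).toNat ≤ fuel →
      (∀ j : Nat, ci < (j : Int) → data.getD j 0 = splitLinkF prices j) →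
      (splitLinkLoop prices data ci fuel).length = prices.length + 4 ∧
        ∀ j : Nat, (splitLinkLoop prices data ci fuel).getD j 0 = splitLinkF prices j := by
  intro fuel
  induction fuel with
  | zero =>
    intro ci data hlen _ hfuel hinv
    refine ⟨hlen, fun j => hinv j ?_⟩
    omega
  | succ fuel ih =>
    intro ci data hlen hci hfuel hinv
    by_cases hge : ci ≥ 0
    · -- one iteration at index k := ci.toNat
      obtain ⟨k, rfl⟩ : ∃ k : Nat, ci = (k : Int) := ⟨ci.toNat, (Int.toNat_of_nonneg hge).symm⟩
      have hk3 : k + 3 ≤ prices.length := by omega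
      have hkdata : k < data.length := by omega
      -- the slices of prices are full 3- and 2-element windows
      have hs3 : PySem.List.slice prices (some (k : Int)) (some ((k : Int) + 3)) = (prices.drop k).take 3 := by
        have := PySem.List.slice_natCast_add (xs := prices) (j := k) (n := 3); exact_mod_cast this
      have hs2 : PySem.List.slice prices (some (k : Int)) (some ((k : Int) + 2)) = (prices.drop k).take 2 := by
        have := PySem.List.slice_natCast_add (xs := prices) (j := k) (n := 2); exact_mod_cast this
      have hget4 : PySem.List.pyGetD data ((k : Int) + 4) 0 = splitLinkF prices (k + 4) := by
        have : PySem.List.pyGetD data (((k + 4 : Nat) : Int)) 0 = data.getD (k + 4) 0 :=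
          PySem.List.pyGetD_natCast ..
        rw [show ((k : Int) + 4) = ((k + 4 : Nat) : Int) by push_cast; ring, this]
        exact hinv (k + 4) (by omega)
      have hget3 : PySem.List.pyGetD data ((k : Int) + 3) 0 = splitLinkF prices (k + 3) := by
        have : PySem.List.pyGetD data (((k + 3 : Nat) : Int)) 0 = data.getD (k + 3) 0 :=
          PySem.List.pyGetD_natCast ..
        rw [show ((k : Int) + 3) = ((k + 3 : Nat) : Int) by push_cast; ring, this]
        exact hinv (k + 3) (by omega)
      have hset : PySem.List.pySetD data (k : Int)
            (max ((PySem.List.slice prices (some (k : Int)) (some ((k : Int) + 3))).sum + PySem.List.pyGetD data ((k : Int) + 4) 0)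
                 ((PySem.List.slice prices (some (k : Int)) (some ((k : Int) + 2))).sum + PySem.List.pyGetD data ((k : Int) + 3) 0))
          = data.set k (splitLinkF prices k) := by
        rw [PySem.List.pySetD_natCast, hs3, hs2, hget4, hget3,
            sum_take_three prices k hk3, sum_take_two prices k (by omega)]
        conv_rhs => rw [splitLinkF]
        rw [if_neg (by omega)]
      rw [splitLinkLoop]
      rw [if_pos hge]
      rw [hset]
      apply ih
      · simp [hlen]
      · omega
      · omega
      · intro j hj
        rcases Nat.lt_or_ge k j with hlt | hle
        · have : (data.set k (splitLinkF prices k)).getD j 0 = data.getD j 0 := by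
            simp only [List.getD, List.getElem?_set]
            rw [if_neg (by omega : ¬ k = j)]
          rw [this]
          exact hinv j (by exact_mod_cast hlt)
        · have hjk : j = k := by omega
          subst hjk
          simp [List.getD, hkdata]
    · -- loop exits
      rw [splitLinkLoop]
      simp only [if_neg hge]
      exact ⟨hlen, fun j => hinv j (by omega)⟩

-- A's result equals max (max (F 0) (F 1)) (F 2)
theorem split_link_eq_F (prices : List Int) :
    split_link prices = max (max (splitLinkF prices 0) (splitLinkF prices 1)) (splitLinkF prices 2) := by
  have hinit : ∀ j : Nat, ((prices.length : Int) - 3) < (j : Int) →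
      (List.replicate (prices.length + 4) (0 : Int)).getD j 0 = splitLinkF prices j := by
    intro j hj
    rw [splitLinkF]
    have h3 : prices.length < j + 3 := by omega
    rw [if_pos h3]
    simp only [List.getD, List.getElem?_replicate]
    split <;> rfl
  obtain ⟨hlen, hall⟩ := splitLinkLoop_invariant prices prices.length
    ((prices.length : Int) - 3) (List.replicate (prices.length + 4) 0)
    (by simp) (le_refl _) (by omega) hinit
  set final := splitLinkLoop prices (List.replicate (prices.length + 4) 0)
      ((prices.length : Int) - 3) prices.length with hfinal
  have hslice : PySem.List.slice final (some 0) (some 3) =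
      [final.getD 0 0, final.getD 1 0, final.getD 2 0] := by
    have h3 : PySem.List.slice final (some ((0 : Nat) : Int)) (some ((3 : Nat) : Int)) =
        (final.drop 0).take (3 - 0) := PySem.List.slice_natCast ..
    simp only [Nat.cast_ofNat, Nat.cast_zero] at h3
    rw [h3]
    simp only [List.drop_zero]
    exact take3_eq_getD final (by omega)
  have hred : split_link prices = (PySem.List.max? (PySem.List.slice final (some 0) (some 3)) (fun x => x)).getD 0 := rfl
  rw [hred, hslice, hall 0, hall 1, hall 2]
  rw [PySem.List.max?_id_cons]
  simp [List.foldl]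

-- B side: the memo invariant — every stored entry is at a nonnegative key and is the
-- corresponding F value
def splitLinkInv (prices : List Int) (memo : PySem.Dict Int Int) : Prop :=
  ∀ (j : Int) (v : Int), memo.get? j = some v → 0 ≤ j ∧ v = splitLinkF prices j.toNat

theorem splitLinkInv_insert (prices : List Int) (memo : PySem.Dict Int Int) (j res : Int)
    (hinv : splitLinkInv prices memo) (hj : 0 ≤ j) (hres : res = splitLinkF prices j.toNat) :
    splitLinkInv prices (memo.insert j res) := by
  intro k v hget
  rw [PySem.Dict.get?_insert] at hget
  split at hget
  · next heq =>
    subst heq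
    exact ⟨hj, by injection hget with h; rw [← h, hres]⟩
  · exact hinv k v hget

theorem splitLinkLoopB_nil (prices : List Int) (n : Int) (fuel : Nat) (memo : PySem.Dict Int Int) :
    splitLinkLoopB prices n fuel memo [] = memo := by
  cases fuel <;> simp [splitLinkLoopB]

-- the stored ready-branch value at a nonnegative j < n - 2 is F j
theorem splitLinkLoopB_res (prices : List Int) (memo : PySem.Dict Int Int) (j : Int)
    (hinv : splitLinkInv prices memo) (hj : 0 ≤ j) (hlt : ¬ j ≥ (prices.length : Int) - 2)
    (h3 : memo.contains (j + 3) = true) (h4 : memo.contains (j + 4) = true) :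
    max ((PySem.List.slice prices (some j) (some (j + 3))).sum + memo.getD (j + 4) 0)
        ((PySem.List.slice prices (some j) (some (j + 2))).sum + memo.getD (j + 3) 0)
      = splitLinkF prices j.toNat := by
  obtain ⟨m, rfl⟩ : ∃ m : Nat, j = (m : Int) := ⟨j.toNat, (Int.toNat_of_nonneg hj).symm⟩
  rw [PySem.Dict.contains_eq_isSome_get?] at h3 h4
  obtain ⟨v3, hv3⟩ := Option.isSome_iff_exists.mp h3
  obtain ⟨v4, hv4⟩ := Option.isSome_iff_exists.mp h4
  have hm3 : m + 3 ≤ prices.length := by omega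
  have hs3 : PySem.List.slice prices (some (m : Int)) (some ((m : Int) + 3)) = (prices.drop m).take 3 := by
    have := PySem.List.slice_natCast_add (xs := prices) (j := m) (n := 3); exact_mod_cast this
  have hs2 : PySem.List.slice prices (some (m : Int)) (some ((m : Int) + 2)) = (prices.drop m).take 2 := by
    have := PySem.List.slice_natCast_add (xs := prices) (j := m) (n := 2); exact_mod_cast this
  have hg4 : memo.getD ((m : Int) + 4) 0 = splitLinkF prices (m + 4) := by
    have h := (hinv _ _ hv4).2
    rw [show (((m : Int) + 4).toNat) = m + 4 from by omega] at h
    rw [PySem.Dict.getD_eq_get?_getD, hv4, Option.getD_some, h]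
  have hg3 : memo.getD ((m : Int) + 3) 0 = splitLinkF prices (m + 3) := by
    have h := (hinv _ _ hv3).2
    rw [show (((m : Int) + 3).toNat) = m + 3 from by omega] at h
    rw [PySem.Dict.getD_eq_get?_getD, hv3, Option.getD_some, h]
  rw [hs3, hs2, hg4, hg3, sum_take_three prices m hm3, sum_take_two prices m (by omega)]
  rw [show ((m : Int).toNat) = m from by omega]
  conv_rhs => rw [splitLinkF]
  rw [if_neg (by omega)]

-- one stack element is fully processed within 4 ^ d fuel ticks, where d bounds n - 2 - j
theorem splitLinkLoopB_process (prices : List Int) :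
    ∀ (d : Nat), ∀ (j : Int) (S : List Int) (memo : PySem.Dict Int Int) (fuel : Nat),
      0 ≤ j → (prices.length : Int) - 2 - j ≤ (d : Int) →
      splitLinkInv prices memo → 4 ^ d ≤ fuel →
      ∃ (fuel' : Nat) (memo' : PySem.Dict Int Int),
        splitLinkLoopB prices (prices.length : Int) fuel memo (j :: S)
          = splitLinkLoopB prices (prices.length : Int) fuel' memo' S ∧
        fuel - 4 ^ d ≤ fuel' ∧
        splitLinkInv prices memo' ∧
        memo'.contains j = true ∧
        (∀ (k v : Int), memo.get? k = some v → memo'.get? k = some v) := by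
  intro d
  induction d using Nat.strong_induction_on with
  | _ d ih =>
  intro j S memo fuel hj hd hinv hfuel
  have hp0 : (1 : Nat) ≤ 4 ^ d := Nat.one_le_pow _ _ (by norm_num)
  obtain ⟨f0, rfl⟩ : ∃ f0, fuel = f0 + 1 := ⟨fuel - 1, by omega⟩
  by_cases hbase : j ≥ (prices.length : Int) - 2
  · -- base: memo[j] = 0, pop
    refine ⟨f0, memo.insert j 0, by rw [splitLinkLoopB, if_pos hbase], by omega, ?_, ?_, ?_⟩
    · refine splitLinkInv_insert prices memo j 0 hinv hj ?_
      rw [splitLinkF_zero prices j.toNat (by omega)]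
    · exact PySem.Dict.contains_insert_self ..
    · intro k v hget
      rw [PySem.Dict.get?_insert]
      split
      · next heq =>
        obtain ⟨hk0, hkv⟩ := hinv _ _ hget
        rw [hkv, splitLinkF_zero prices k.toNat (by omega)]
      · exact hget
  · by_cases hmem : memo.contains j = true
    · -- already memoized: pop
      exact ⟨f0, memo, by rw [splitLinkLoopB, if_neg hbase, if_pos hmem], by omega, hinv, hmem,
        fun _ _ h => h⟩
    · by_cases hready : (memo.contains (j + 3) && memo.contains (j + 4)) = true
      · -- both children memoized: store F j and pop
        rw [Bool.and_eq_true] at hready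
        refine ⟨f0, _, by rw [splitLinkLoopB, if_neg hbase, if_neg (by simp [hmem]),
            if_pos (by simp [hready.1, hready.2])], by omega, ?_, ?_, ?_⟩
        · exact splitLinkInv_insert prices memo j _ hinv hj
            (splitLinkLoopB_res prices memo j hinv hj hbase hready.1 hready.2)
        · exact PySem.Dict.contains_insert_self ..
        · intro k v hget
          rw [PySem.Dict.get?_insert]
          split
          · next heq =>
            subst heq
            rw [PySem.Dict.contains_eq_isSome_get?, hget] at hmem
            simp at hmem
          · exact hget
      · -- expand: push j+3 and j+4, keep j
        have hd1 : 1 ≤ d := by omega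
        have hpow1 : 4 ^ (d - 3) ≤ 4 ^ (d - 1) := Nat.pow_le_pow_right (by norm_num) (by omega)
        have hpow2 : 4 ^ (d - 1) * 4 = 4 ^ d := by
          rw [← pow_succ]
          congr 1
          omega
        have hpow3 : (1 : Nat) ≤ 4 ^ (d - 1) := Nat.one_le_pow _ _ (by norm_num)
        have hstep : splitLinkLoopB prices (prices.length : Int) (f0 + 1) memo (j :: S)
            = splitLinkLoopB prices (prices.length : Int) f0 memo ((j + 3) :: (j + 4) :: j :: S) := by
          rw [splitLinkLoopB, if_neg hbase, if_neg (by simp [hmem]), if_neg (by simp [hready])]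
        obtain ⟨f2, memo2, heq2, hf2, hinv2, hc2, hmono2⟩ :=
          ih (d - 3) (by omega) (j + 3) ((j + 4) :: j :: S) memo f0 (by omega) (by omega) hinv (by omega)
        obtain ⟨f3, memo3, heq3, hf3, hinv3, hc3, hmono3⟩ :=
          ih (d - 3) (by omega) (j + 4) (j :: S) memo2 f2 (by omega) (by omega) hinv2 (by omega)
        have hc2' : memo3.contains (j + 3) = true := by
          rw [PySem.Dict.contains_eq_isSome_get?] at hc2 ⊢
          obtain ⟨v, hv⟩ := Option.isSome_iff_exists.mp hc2
          rw [hmono3 _ _ hv]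
          rfl
        obtain ⟨g, rfl⟩ : ∃ g, f3 = g + 1 := ⟨f3 - 1, by omega⟩
        by_cases hmem3 : memo3.contains j = true
        · refine ⟨g, memo3, ?_, by omega, hinv3, hmem3, fun k v h => hmono3 k v (hmono2 k v h)⟩
          rw [hstep, heq2, heq3, splitLinkLoopB, if_neg hbase, if_pos hmem3]
        · refine ⟨g, memo3.insert j
              (max ((PySem.List.slice prices (some j) (some (j + 3))).sum + memo3.getD (j + 4) 0)
                   ((PySem.List.slice prices (some j) (some (j + 2))).sum + memo3.getD (j + 3) 0)),
              ?_, by omega, ?_, PySem.Dict.contains_insert_self .., ?_⟩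
          · rw [hstep, heq2, heq3, splitLinkLoopB, if_neg hbase, if_neg (by simp [hmem3]),
              if_pos (by simp [hc2', hc3])]
          · exact splitLinkInv_insert prices memo3 j _ hinv3 hj
              (splitLinkLoopB_res prices memo3 j hinv3 hj hbase hc2' hc3)
          · intro k v hget
            rw [PySem.Dict.get?_insert]
            split
            · next heq =>
              subst heq
              have := hmono3 _ _ (hmono2 _ _ hget)
              rw [PySem.Dict.contains_eq_isSome_get?, this] at hmem3
              simp at hmem3
            · exact hmono3 _ _ (hmono2 _ _ hget)

-- f(i) returns F i and leaves a memo still satisfying the invariant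
theorem splitLinkFAux_spec (prices : List Int) (memo : PySem.Dict Int Int) (i : Int)
    (hi : 0 ≤ i) (hinv : splitLinkInv prices memo) :
    (splitLinkFAux prices (prices.length : Int) memo i).2 = splitLinkF prices i.toNat ∧
      splitLinkInv prices (splitLinkFAux prices (prices.length : Int) memo i).1 := by
  obtain ⟨fuel', memo', heq, _, hinv', hc', _⟩ :=
    splitLinkLoopB_process prices prices.length i [] memo (4 ^ prices.length) hi
      (by omega) hinv (le_refl _)
  have hrun : splitLinkLoopB prices (prices.length : Int) (4 ^ prices.length) memo [i] = memo' := by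
    rw [heq, splitLinkLoopB_nil]
  rw [PySem.Dict.contains_eq_isSome_get?] at hc'
  obtain ⟨v, hv⟩ := Option.isSome_iff_exists.mp hc'
  constructor
  · show (splitLinkLoopB prices (prices.length : Int) (4 ^ prices.length) memo [i]).getD i 0 = _
    rw [hrun, PySem.Dict.getD_eq_get?_getD, hv, Option.getD_some]
    exact (hinv' _ _ hv).2
  · show splitLinkInv prices (splitLinkLoopB prices (prices.length : Int) (4 ^ prices.length) memo [i])
    rw [hrun]
    exact hinv'

theorem split_link_alt_eq_F (prices : List Int) :
    split_link_alt prices = max (max (splitLinkF prices 0) (splitLinkF prices 1)) (splitLinkF prices 2) := by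
  have hempty : splitLinkInv prices PySem.Dict.empty := by
    intro j v hget
    rw [PySem.Dict.get?_empty] at hget
    exact absurd hget (by simp)
  obtain ⟨h0v, h0inv⟩ := splitLinkFAux_spec prices PySem.Dict.empty 0 (by omega) hempty
  obtain ⟨h1v, h1inv⟩ := splitLinkFAux_spec prices _ 1 (by omega) h0inv
  obtain ⟨h2v, _⟩ := splitLinkFAux_spec prices _ 2 (by omega) h1inv
  show max (max (splitLinkFAux prices (prices.length : Int) PySem.Dict.empty 0).2
      (splitLinkFAux prices (prices.length : Int)
        (splitLinkFAux prices (prices.length : Int) PySem.Dict.empty 0).1 1).2)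
      (splitLinkFAux prices (prices.length : Int)
        (splitLinkFAux prices (prices.length : Int)
          (splitLinkFAux prices (prices.length : Int) PySem.Dict.empty 0).1 1).1 2).2 = _
  rw [h0v, h1v, h2v, show Int.toNat 0 = 0 from rfl, show Int.toNat 1 = 1 from rfl,
      show Int.toNat 2 = 2 from rfl]

-- ===== VERDICT (by name: the statement is the Claim_ definition above) =====
theorem split_link_spec : Claim_equal_split_link := by
  intro prices _
  unfold Spec_split_link
  rw [split_link_eq_F, split_link_alt_eq_F]
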